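-- pv_equiv track=rewrite | github.com/openclawgotchi/doc | src/bot/handlers.py | _ensure_tool_usage_in_code_block
-- ===== SOURCE A (Python) =====
-- def _ensure_tool_usage_in_code_block(text: str) -> str:
--     """Wrap Tool usage footer in ``` blocks if not already wrapped."""
--     if "Tool usage" not in text:
--         return text
--
--     # Check if Tool usage is already inside a code block
--     lines = text.split("\n")
--     in_code_block = False
--     tool_usage_line_idx = None
--
--     for i, line in enumerate(lines):
--         if line.strip().startswith("```"):
--             in_code_block = not in_code_block
--         if "Tool usage" in line:
--             tool_usage_line_idx = i
--             break
--
--     # If Tool usage found and NOT in code block, wrap it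
--     if tool_usage_line_idx is not None and not in_code_block:
--         # Find where Tool usage section starts
--         tool_start = tool_usage_line_idx
--         # Insert ``` before Tool usage
--         lines.insert(tool_start, "```")
--         # Find end of Tool usage section (next empty line or end)
--         tool_end = tool_start + 1
--         while tool_end < len(lines) and lines[tool_end].strip() and not lines[tool_end].strip().startswith("FACE:"):
--             tool_end += 1
--         # Insert ``` after Tool usage section
--         lines.insert(tool_end, "```")
--
--     return "\n".join(lines)
-- ===== SOURCE B (Python) =====
-- def _section_prefix(ls):
--     """Longest prefix of ls of nonblank lines not starting with 'FACE:' (recursive)."""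
--     if not ls or not ls[0].strip() or ls[0].strip().startswith("FACE:"):
--         return []
--     return [ls[0]] + _section_prefix(ls[1:])
--
--
-- def _ensure_tool_usage_in_code_block(text: str) -> str:
--     """Wrap Tool usage footer in ``` blocks if not already wrapped.
--
--     Staged declarative passes over immutable slices instead of A's stateful
--     toggle-scan with two in-place inserts: the marker line is located by a
--     filtered enumeration, wrapping is decided by fence-count parity over the
--     prefix slice, the section is split off by a recursive takewhile helper,
--     and the result is assembled by slice concatenation."""
--     if "Tool usage" not in text:
--         return text
--     lines = text.split("\n")
--     hits = [i for i, l in enumerate(lines) if "Tool usage" in l]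
--     if not hits:
--         return "\n".join(lines)
--     idx = hits[0]
--     if len([l for l in lines[:idx + 1] if l.strip().startswith("```")]) % 2 == 1:
--         return "\n".join(lines)
--     sec = _section_prefix(lines[idx:])
--     return "\n".join(lines[:idx] + ["```"] + sec + ["```"] + lines[idx + len(sec):])
-- ===== Notes on version B (the rewrite author's own statement) =====
-- stated objective: alternative
-- what changed: B replaces A's single stateful scan (toggling an in_code_block flag while hunting the marker) plus two in-place list.insert mutations by staged declarative passes: a filtered enumeration yields the marker line's index, fence-count parity over the prefix slice decides whether to wrap, a recursive takewhile helper splits off the section, and the result is rebuilt by slice concatenation.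
import Mathlib
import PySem

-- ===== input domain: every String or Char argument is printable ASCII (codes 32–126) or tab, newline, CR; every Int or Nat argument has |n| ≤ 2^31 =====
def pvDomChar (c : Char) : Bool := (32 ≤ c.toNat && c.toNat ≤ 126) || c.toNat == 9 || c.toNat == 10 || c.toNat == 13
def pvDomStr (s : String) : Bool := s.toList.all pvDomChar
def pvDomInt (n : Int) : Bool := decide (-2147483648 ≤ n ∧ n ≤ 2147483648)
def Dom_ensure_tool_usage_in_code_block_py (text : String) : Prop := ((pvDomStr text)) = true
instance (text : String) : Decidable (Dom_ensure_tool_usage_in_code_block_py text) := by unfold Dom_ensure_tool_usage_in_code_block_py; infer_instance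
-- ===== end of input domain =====

-- B replaces A's stateful toggle-scan plus two in-place inserts by staged declarative
-- passes (filtered enumeration, fence-count parity over a slice, a recursive takewhile
-- helper, slice concatenation); objective: alternative decomposition, same cost.

-- ===== PORT A =====
-- shared line predicate of A's while loop: line.strip() and not line.strip().startswith("FACE:")
def pvSecLine (l : String) : Bool :=
  (PySem.Str.strip l != "") && !(PySem.Str.startswith (PySem.Str.strip l) "FACE:")

-- the first for-loop of A: toggles in_code_block, breaks at the first "Tool usage" line
def pvAfind : List String → Nat → Bool → Bool × Option Nat
  | [], _, ic => (ic, none)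
  | l :: ls, i, ic =>
    if PySem.Str.isIn "Tool usage" l then
      (if PySem.Str.startswith (PySem.Str.strip l) "```" then !ic else ic, some i)
    else pvAfind ls (i + 1) (if PySem.Str.startswith (PySem.Str.strip l) "```" then !ic else ic)

-- the while-loop advancing tool_end
def pvAend (lines : List String) (j : Nat) : Nat :=
  if h : j < lines.length ∧ pvSecLine (lines.getD j "") = true then pvAend lines (j + 1)
  else j
termination_by lines.length - j
decreasing_by omega

def ensure_tool_usage_in_code_block_py (text : String) : String :=
  if PySem.Str.isIn "Tool usage" text = false then text
  else
    -- sep "\n" is a nonempty literal, so split? is always some (text.split("\n"))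
    let lines := (PySem.Str.split? text "\n").getD []
    let found := pvAfind lines 0 false
    let lines2 :=
      match found.2 with
      | some idx =>
        if found.1 then lines
        else
          let l1 := PySem.List.insert lines (idx : Int) "```"
          let e := pvAend l1 (idx + 1)
          PySem.List.insert l1 (e : Int) "```"
      | none => lines
    PySem.Str.join "\n" lines2

-- ===== PORT B =====
-- B's recursive helper _section_prefix
def pvSecPrefix : List String → List String
  | [] => []
  | l :: ls =>
    if PySem.Str.strip l == "" || PySem.Str.startswith (PySem.Str.strip l) "FACE:" then []
    else l :: pvSecPrefix ls

def ensure_tool_usage_in_code_block_py_alt (text : String) : String :=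
  if PySem.Str.isIn "Tool usage" text = false then text
  else
    -- sep "\n" is a nonempty literal, so split? is always some (text.split("\n"))
    let lines := (PySem.Str.split? text "\n").getD []
    let hits := ((PySem.List.enumerate lines 0).filter
      (fun p => PySem.Str.isIn "Tool usage" p.2)).map Prod.fst
    match hits with
    | [] => PySem.Str.join "\n" lines
    | idx :: _ =>
      if ((PySem.List.slice lines none (some (idx + 1))).filter
            (fun l => PySem.Str.startswith (PySem.Str.strip l) "```")).length % 2 == 1 then
        PySem.Str.join "\n" lines
      else
        let sec := pvSecPrefix (PySem.List.slice lines (some idx) none)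
        PySem.Str.join "\n"
          (PySem.List.slice lines none (some idx) ++ "```" ::
            (sec ++ "```" :: PySem.List.slice lines (some (idx + (sec.length : Int))) none))

-- ===== PRECONDITION & SPEC =====
def Spec_ensure_tool_usage_in_code_block_py (text : String) (out : String) : Prop := out = ensure_tool_usage_in_code_block_py_alt text
instance (text : String) (out : String) : Decidable (Spec_ensure_tool_usage_in_code_block_py text out) := by unfold Spec_ensure_tool_usage_in_code_block_py; infer_instance

-- ===== CLAIM (what is proved, stated in full; the proofs are below) =====
def Claim_equal_ensure_tool_usage_in_code_block_py : Prop := ∀ (text : String), Dom_ensure_tool_usage_in_code_block_py text → Spec_ensure_tool_usage_in_code_block_py text (ensure_tool_usage_in_code_block_py text)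

-- ===== LEMMAS AND PROOFS =====

-- abbreviations for the two line tests (proof-side only)
def pvHit (l : String) : Bool := PySem.Str.isIn "Tool usage" l
def pvFence (l : String) : Bool := PySem.Str.startswith (PySem.Str.strip l) "```"

-- B's hits list: its head through findIdx?
theorem hits_head (ls : List String) : ∀ (s : Int),
    (((PySem.List.enumerate ls s).filter (fun p => pvHit p.2)).map Prod.fst).head?
      = (ls.findIdx? pvHit).map (fun j => s + (j : Int)) := by
  induction ls with
  | nil => intro s; simp [PySem.List.enumerate_nil]
  | cons l ls ih =>
    intro s
    rw [PySem.List.enumerate_cons, List.findIdx?_cons]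
    by_cases h : pvHit l = true
    · simp [h]
    · have h2 := ih (s + 1)
      rw [List.filter_cons_of_neg (by simpa using h), if_neg h]
      rcases hF : List.findIdx? pvHit ls with _ | j <;> rw [hF] at h2
      · simpa using h2
      · rw [h2]; simp; ring

theorem parity_step (c : Nat) (f b : Bool) :
    xor (xor b f) (decide (c % 2 = 1))
      = xor b (decide (((if f then 1 else 0) + c) % 2 = 1)) := by
  cases f <;> cases b <;> simp <;>
    (rcases Nat.mod_two_eq_zero_or_one c with h | h <;> simp [Nat.add_mod, h])

-- A's scan at a hit: the flag is the fence-count parity of the prefix including the hit line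
theorem pvAfind_some (ls : List String) : ∀ (i : Nat) (b : Bool) (j : Nat),
    ls.findIdx? pvHit = some j →
    j < ls.length ∧
    pvAfind ls i b
      = (xor b (decide ((ls.take (j + 1)).countP pvFence % 2 = 1)), some (i + j)) := by
  induction ls with
  | nil => intro i b j h; simp at h
  | cons l ls ih =>
    intro i b j h
    rw [List.findIdx?_cons] at h
    by_cases hl : pvHit l = true
    · rw [if_pos hl] at h
      injection h with h; subst h
      refine ⟨by simp, ?_⟩
      rw [pvAfind, if_pos (show PySem.Str.isIn "Tool usage" l = true from hl)]
      simp only [List.take_succ_cons, List.take_zero, List.countP_cons, List.countP_nil]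
      cases hf : pvFence l <;> simp_all [pvFence]
    · rw [if_neg hl] at h
      rcases hF : List.findIdx? pvHit ls with _ | j' <;> rw [hF] at h
      · simp at h
      · simp only [Option.map_some] at h
        injection h with h; subst h
        have h2 := ih (i + 1) (if pvFence l then !b else b) j' hF
        refine ⟨by simp; omega, ?_⟩
        rw [pvAfind, if_neg (show ¬ PySem.Str.isIn "Tool usage" l = true from hl)]
        rw [show (if PySem.Str.startswith (PySem.Str.strip l) "```" then !b else b) = (if pvFence l then !b else b) from rfl]
        rw [h2.2]
        have hx : (if pvFence l then !b else b) = xor b (pvFence l) := by cases pvFence l <;> simp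
        rw [hx, parity_step]
        have hc : (if pvFence l then 1 else 0) + (ls.take (j' + 1)).countP pvFence
            = ((l :: ls).take (j' + 1 + 1)).countP pvFence := by
          simp only [List.take_succ_cons, List.countP_cons]
          cases pvFence l <;> simp <;> omega
        rw [hc, Prod.mk.injEq]
        exact ⟨rfl, by simp; omega⟩

-- A's scan with no hit
theorem pvAfind_none (ls : List String) : ∀ (i : Nat) (b : Bool),
    ls.findIdx? pvHit = none → (pvAfind ls i b).2 = none := by
  induction ls with
  | nil => intro i b _; rfl
  | cons l ls ih =>
    intro i b h
    rw [List.findIdx?_cons] at h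
    by_cases hl : pvHit l = true
    · rw [if_pos hl] at h; simp at h
    · rw [if_neg hl] at h
      rw [pvAfind, if_neg (show ¬ PySem.Str.isIn "Tool usage" l = true from hl)]
      exact ih _ _ (by rcases hF : List.findIdx? pvHit ls with _ | j; rfl; rw [hF] at h; simp at h)

-- B's section-prefix test is the negation of A's while-loop test
theorem pvSecPrefix_cond (l : String) :
    (PySem.Str.strip l == "" || PySem.Str.startswith (PySem.Str.strip l) "FACE:") = !pvSecLine l := by
  simp only [pvSecLine, Bool.not_and, Bool.not_not, bne]

-- B's section prefix is a prefix of its argument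
theorem pvSecPrefix_prefix (ls : List String) :
    pvSecPrefix ls ++ ls.drop (pvSecPrefix ls).length = ls := by
  induction ls with
  | nil => rfl
  | cons l ls ih =>
    rw [pvSecPrefix, pvSecPrefix_cond]
    by_cases h : pvSecLine l = true
    · rw [h]; simpa using ih
    · simp only [Bool.not_eq_true] at h; rw [h]; simp

-- A's while-loop over pre ++ r, started at pre.length, through B's section prefix
theorem pvAend_spec (r : List String) : ∀ (pre : List String),
    pvAend (pre ++ r) pre.length = pre.length + (pvSecPrefix r).length := by
  induction r with
  | nil =>
    intro pre
    rw [pvAend]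
    simp [pvSecPrefix]
  | cons l ls ih =>
    intro pre
    have hget : (pre ++ l :: ls).getD pre.length "" = l := by
      simp [List.getD_eq_getElem?_getD]
    rw [pvSecPrefix, pvSecPrefix_cond]
    by_cases hp : pvSecLine l = true
    · have hrec := ih (pre ++ [l])
      rw [pvAend, dif_pos (by refine ⟨by simp, ?_⟩; rw [hget]; exact hp)]
      simp only [List.append_assoc, List.singleton_append, List.length_append,
        List.length_singleton] at hrec
      rw [hp]
      simp only [Bool.not_true]
      rw [hrec]
      simp; omega
    · rw [pvAend, dif_neg (by rw [hget]; exact fun hc => hp hc.2)]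
      simp only [Bool.not_eq_true] at hp
      rw [hp]
      simp

theorem ports_agree (text : String) :
    ensure_tool_usage_in_code_block_py_alt text = ensure_tool_usage_in_code_block_py text := by
  unfold ensure_tool_usage_in_code_block_py ensure_tool_usage_in_code_block_py_alt
  by_cases hg : PySem.Str.isIn "Tool usage" text = false
  · rw [if_pos hg, if_pos hg]
  · rw [if_neg hg, if_neg hg]
    dsimp only
    set lines := (PySem.Str.split? text "\n").getD [] with hlines
    have hh := hits_head lines 0
    rcases hH : ((PySem.List.enumerate lines 0).filter
        (fun p => PySem.Str.isIn "Tool usage" p.2)).map Prod.fst with _ | ⟨idx, rest⟩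
    · -- no line contains the marker
      rw [show ((PySem.List.enumerate lines 0).filter (fun p => pvHit p.2)).map Prod.fst
          = [] from hH] at hh
      rcases hF : lines.findIdx? pvHit with _ | j
      · rw [hH, pvAfind_none lines 0 false hF]
      · rw [hF] at hh; simp at hh
    · rw [show ((PySem.List.enumerate lines 0).filter (fun p => pvHit p.2)).map Prod.fst
          = idx :: rest from hH] at hh
      rcases hF : lines.findIdx? pvHit with _ | j
      · rw [hF] at hh; simp at hh
      · rw [hF] at hh
        simp only [List.head?_cons] at hh
        injection hh with hh
        subst hh
        obtain ⟨hjlen, hAf⟩ := pvAfind_some lines 0 false j hF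
        rw [hH, hAf]
        dsimp only
        -- the two parity tests agree
        have hslice : PySem.List.slice lines none (some (0 + (j : Int) + 1))
            = lines.take (j + 1) := by
          rw [show (0 + (j : Int) + 1) = ((j + 1 : Nat) : Int) by push_cast; ring]
          rw [PySem.List.slice_to lines (by positivity)]
          simp
        have hcond : (((PySem.List.slice lines none (some (0 + (j : Int) + 1))).filter
              (fun l => PySem.Str.startswith (PySem.Str.strip l) "```")).length % 2 == 1)
            = xor false (decide ((lines.take (j + 1)).countP pvFence % 2 = 1)) := by
          rw [hslice, Bool.false_xor, ← List.countP_eq_length_filter]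
          rfl
        rw [hcond]
        by_cases hp : xor false (decide ((lines.take (j + 1)).countP pvFence % 2 = 1)) = true
        · rw [if_pos hp, if_pos hp]
        · rw [if_neg hp, if_neg hp]
          simp only [Bool.false_xor] at hp ⊢
          simp only [Nat.zero_add]
          -- unwrapped case: relate A's double insert to B's concatenation
          set o := lines.take j with ho
          set r0 := lines.drop j with hr0
          set sec := pvSecPrefix r0 with hsec
          have holen : o.length = j := by
            rw [ho, List.length_take]; omega
          have hins1 : PySem.List.insert lines ((j : Nat) : Int) "```" = o ++ "```" :: r0 :=
            PySem.List.insert_natCast lines j "```" (by omega)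
          have hsl0 : PySem.List.slice lines (some (0 + (j : Int))) none = r0 := by
            rw [show (0 + (j : Int)) = ((j : Nat) : Int) by ring]
            rw [PySem.List.slice_from lines (by positivity)]
            simp [hr0]
          have hslA : PySem.List.slice lines none (some (0 + (j : Int))) = o := by
            rw [show (0 + (j : Int)) = ((j : Nat) : Int) by ring]
            rw [PySem.List.slice_to lines (by positivity)]
            simp [ho]
          have hae : pvAend (o ++ "```" :: r0) (j + 1) = j + 1 + sec.length := by
            have := pvAend_spec r0 (o ++ ["```"])
            simp only [List.length_append, List.length_singleton, holen,
              List.append_assoc, List.singleton_append] at this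
            rw [this]
          rw [hins1, hae]
          have hrst : r0 = sec ++ r0.drop sec.length := (pvSecPrefix_prefix r0).symm
          have hslB : PySem.List.slice lines (some (0 + (j : Int) + (sec.length : Int))) none
              = r0.drop sec.length := by
            rw [show (0 + (j : Int) + (sec.length : Int)) = ((j + sec.length : Nat) : Int) by push_cast; ring]
            rw [PySem.List.slice_from lines (by positivity)]
            simp only [Int.toNat_natCast, hr0]
            rw [Nat.add_comm, List.drop_drop, Nat.add_comm]
          have hins2 : PySem.List.insert (o ++ "```" :: r0) ((j + 1 + sec.length : Nat) : Int) "```"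
              = o ++ "```" :: (sec ++ "```" :: r0.drop sec.length) := by
            have hsplit : o ++ "```" :: r0 = (o ++ "```" :: sec) ++ r0.drop sec.length := by
              conv_lhs => rw [hrst]
              simp
            have hl2 : (o ++ "```" :: sec).length = j + 1 + sec.length := by
              simp [holen]; omega
            rw [PySem.List.insert_natCast _ _ "```"
              (by rw [hsplit]; simp only [List.length_append, hl2]; omega)]
            rw [hsplit, ← hl2, List.take_left, List.drop_left]
            simp
          rw [show ((j:Nat) + 1 + sec.length : Nat) = j + 1 + sec.length from rfl] at hins2
          rw [hins2, hsl0, hslA, ← hsec, hslB]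

-- ===== VERDICT (by name: the statement is the Claim_ definition above) =====
theorem ensure_tool_usage_in_code_block_py_spec : Claim_equal_ensure_tool_usage_in_code_block_py := by
  intro text _
  unfold Spec_ensure_tool_usage_in_code_block_py
  exact (ports_agree text).symm
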